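-- pv_equiv track=rewrite | github.com/leonardodazeredo/mcmc | Lista3/3/questao3.py | contagem_cumulativa_da_indicadora_por_n
-- ===== SOURCE A (Python) =====
-- def contagem_cumulativa_da_indicadora_por_n(l):
--     l2 = list()
--     k = 0
--     for e in l:
--         if e[0] == 'True':
--         # if e:
--             k = k + 1
--         l2.append(k)
--     return l2
-- ===== SOURCE B (Python) =====
-- def contagem_cumulativa_da_indicadora_por_n(l):
--     # Two-pass, back-to-front: count the total number of 'True' indicators first,
--     # then walk the list from the right, emitting the running total and
--     # subtracting each element's indicator, finally reversing the output.
--     total = sum(1 for e in l if e[0] == 'True')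
--     out = []
--     for e in reversed(l):
--         out.append(total)
--         if e[0] == 'True':
--             total -= 1
--     out.reverse()
--     return out
-- ===== Notes on version B (the rewrite author's own statement) =====
-- stated objective: alternative
-- what changed: Replaces the single forward pass with a running counter by a two-pass scheme: first count the total number of 'True' indicators, then build the output back-to-front from the right, subtracting each element's indicator from the running total, and reverse the result.
import Mathlib
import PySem

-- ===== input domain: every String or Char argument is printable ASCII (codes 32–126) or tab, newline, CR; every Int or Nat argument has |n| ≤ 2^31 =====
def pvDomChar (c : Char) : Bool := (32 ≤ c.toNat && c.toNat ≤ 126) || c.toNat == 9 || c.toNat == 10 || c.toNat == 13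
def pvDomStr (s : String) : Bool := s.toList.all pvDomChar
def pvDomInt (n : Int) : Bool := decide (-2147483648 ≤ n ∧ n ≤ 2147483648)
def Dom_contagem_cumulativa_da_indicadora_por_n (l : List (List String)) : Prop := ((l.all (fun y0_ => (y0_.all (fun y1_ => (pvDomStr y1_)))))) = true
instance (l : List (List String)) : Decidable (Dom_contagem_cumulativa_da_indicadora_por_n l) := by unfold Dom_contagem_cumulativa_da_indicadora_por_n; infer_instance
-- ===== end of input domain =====

-- B replaces the forward running-counter loop by a two-pass scheme: total count first, then a
-- right-to-left pass emitting the running total and subtracting each indicator; alternative, same cost.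

-- ===== PORT A =====
-- A's for-loop with running counter k, appending k after each element
def pvGoA (l : List (List String)) (k : Int) : List Int :=
  match l with
  | [] => []
  | e :: rest =>
      let k' := if PySem.List.pyGet? e 0 = some "True" then k + 1 else k
      k' :: pvGoA rest k'

def contagem_cumulativa_da_indicadora_por_n (l : List (List String)) : List Int :=
  pvGoA l 0

-- ===== PORT B =====
-- total = sum(1 for e in l if e[0] == 'True')  (running sum over the list)
def pvTotalB (l : List (List String)) (s : Int) : Int :=
  match l with
  | [] => s
  | e :: rest => pvTotalB rest (if PySem.List.pyGet? e 0 = some "True" then s + 1 else s)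

-- the 'for e in reversed(l)' loop body: emit total, then subtract e's indicator
def pvOutB (l : List (List String)) (t : Int) : List Int :=
  match l with
  | [] => []
  | e :: rest => t :: pvOutB rest (if PySem.List.pyGet? e 0 = some "True" then t - 1 else t)

def contagem_cumulativa_da_indicadora_por_n_alt (l : List (List String)) : List Int :=
  let total := pvTotalB l 0
  (pvOutB l.reverse total).reverse

-- ===== PRECONDITION & SPEC =====
-- Pre_ excludes lists containing an empty inner list: there Python's e[0] raises IndexError (in A and in B alike).
def Pre_contagem_cumulativa_da_indicadora_por_n (l : List (List String)) : Prop :=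
  ∀ e ∈ l, e ≠ []
instance (l : List (List String)) : Decidable (Pre_contagem_cumulativa_da_indicadora_por_n l) := by
  unfold Pre_contagem_cumulativa_da_indicadora_por_n; infer_instance

def pvWitness_contagem_cumulativa_da_indicadora_por_n : List (List String) :=
  [["True"], ["False", "x"], ["True"]]

def Spec_contagem_cumulativa_da_indicadora_por_n (l : List (List String)) (out : List Int) : Prop := out = contagem_cumulativa_da_indicadora_por_n_alt l
instance (l : List (List String)) (out : List Int) : Decidable (Spec_contagem_cumulativa_da_indicadora_por_n l out) := by unfold Spec_contagem_cumulativa_da_indicadora_por_n; infer_instance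

-- ===== CLAIM (what is proved, stated in full; the proofs are below) =====
def Claim_equal_contagem_cumulativa_da_indicadora_por_n : Prop := ∀ (l : List (List String)), Dom_contagem_cumulativa_da_indicadora_por_n l → Pre_contagem_cumulativa_da_indicadora_por_n l → Spec_contagem_cumulativa_da_indicadora_por_n l (contagem_cumulativa_da_indicadora_por_n l)

-- ===== LEMMAS AND PROOFS =====
-- the 0/1 indicator of one element, for stating the invariants
def pvInd (e : List String) : Int :=
  if PySem.List.pyGet? e 0 = some "True" then 1 else 0

def pvCnt (l : List (List String)) : Int :=
  match l with
  | [] => 0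
  | e :: rest => pvInd e + pvCnt rest

theorem pvTotalB_eq (l : List (List String)) (s : Int) : pvTotalB l s = s + pvCnt l := by
  induction l generalizing s with
  | nil => simp [pvTotalB, pvCnt]
  | cons e rest ih =>
      simp only [pvTotalB, pvCnt, pvInd, ih]
      split_ifs <;> ring

theorem pvCnt_append (xs ys : List (List String)) : pvCnt (xs ++ ys) = pvCnt xs + pvCnt ys := by
  induction xs with
  | nil => simp [pvCnt]
  | cons e rest ih => simp [pvCnt, ih]; ring

theorem pvCnt_reverse (l : List (List String)) : pvCnt l.reverse = pvCnt l := by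
  induction l with
  | nil => rfl
  | cons e rest ih => simp [List.reverse_cons, pvCnt_append, pvCnt, ih]; ring

theorem pvOutB_append (xs ys : List (List String)) (t : Int) :
    pvOutB (xs ++ ys) t = pvOutB xs t ++ pvOutB ys (t - pvCnt xs) := by
  induction xs generalizing t with
  | nil => simp [pvOutB, pvCnt]
  | cons e rest ih =>
      simp only [List.cons_append, pvOutB, pvCnt, pvInd, ih]
      split_ifs with h <;> simp [sub_sub]

theorem pvGoA_eq_outB (l : List (List String)) (k : Int) :
    pvGoA l k = (pvOutB l.reverse (k + pvCnt l)).reverse := by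
  induction l generalizing k with
  | nil => rfl
  | cons e rest ih =>
      have hrev : (e :: rest).reverse = rest.reverse ++ [e] := by simp
      rw [hrev, pvOutB_append, pvCnt_reverse]
      simp only [pvGoA, pvCnt, pvOutB, pvInd]
      split_ifs with h
      · have h1 : k + (1 + pvCnt rest) - pvCnt rest = k + 1 := by ring
        have h2 : k + (1 + pvCnt rest) = (k + 1) + pvCnt rest := by ring
        rw [h1, h2, ih (k + 1)]
        simp
      · have h1 : k + (0 + pvCnt rest) - pvCnt rest = k := by ring
        have h2 : k + (0 + pvCnt rest) = k + pvCnt rest := by ring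
        rw [h1, h2, ih k]
        simp

-- ===== VERDICT (by name: the statement is the Claim_ definition above) =====
theorem contagem_cumulativa_da_indicadora_por_n_spec : Claim_equal_contagem_cumulativa_da_indicadora_por_n := by
  intro l _ _
  unfold Spec_contagem_cumulativa_da_indicadora_por_n contagem_cumulativa_da_indicadora_por_n contagem_cumulativa_da_indicadora_por_n_alt
  rw [pvTotalB_eq, pvGoA_eq_outB]
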